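-- pv_equiv track=rewrite | github.com/CoralShalmoni/python-course-assignments | day07/extended_dna_sequencing_with_functions.py | get_clean_sequences
-- ===== SOURCE A (Python) =====
-- def get_clean_sequences(dna, valid_bases="ACTG"):
--     """Split DNA sequence into clean sub-sequences of valid bases only."""
--     current = ""
--     sequences = []
--
--     for char in dna:
--         if char in valid_bases:
--             current += char
--         else:
--             if current:
--                 sequences.append(current)
--                 current = ""
--     if current:
--         sequences.append(current)
--
--     return sequences
-- ===== SOURCE B (Python) =====
-- def get_clean_sequences(dna, valid_bases="ACTG"):
--     """Split DNA sequence into clean sub-sequences of valid bases only."""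
--     sequences = []
--     i, n = 0, len(dna)
--     while i < n:
--         if dna[i] in valid_bases:
--             j = i + 1
--             while j < n and dna[j] in valid_bases:
--                 j += 1
--             sequences.append(dna[i:j])
--             i = j
--         else:
--             i += 1
--     return sequences
-- ===== Notes on version B (the rewrite author's own statement) =====
-- stated objective: alternative
-- what changed: Replaces A's current-string accumulator/flush state machine with a two-pointer index scan that finds each maximal valid run and emits it as a slice dna[i:j].
import Mathlib
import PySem

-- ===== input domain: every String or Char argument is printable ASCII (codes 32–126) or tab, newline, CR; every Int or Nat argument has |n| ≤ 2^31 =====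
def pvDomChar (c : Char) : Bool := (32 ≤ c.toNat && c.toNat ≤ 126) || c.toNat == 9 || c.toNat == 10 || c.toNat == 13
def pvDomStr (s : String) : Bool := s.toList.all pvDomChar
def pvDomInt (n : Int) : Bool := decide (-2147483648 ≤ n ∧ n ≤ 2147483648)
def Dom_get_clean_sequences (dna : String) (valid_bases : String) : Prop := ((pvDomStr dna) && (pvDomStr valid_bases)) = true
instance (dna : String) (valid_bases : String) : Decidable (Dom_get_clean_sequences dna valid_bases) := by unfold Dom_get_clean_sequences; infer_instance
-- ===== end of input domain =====

-- B is an alternative implementation: a two-pointer index scan emitting maximal valid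
-- runs as slices, instead of A's current-accumulator/flush state machine.

-- Python's `char in valid_bases` (char is a single character): exact via PySem.Chars.isIn
def pvMem (vb : List Char) (c : Char) : Bool := PySem.Chars.isIn [c] vb

-- ===== PORT A =====
-- the loop body of A's for-loop over dna, state = (current, sequences);
-- `current` is kept as List Char (Lean's String.append is kernel-opaque), converted at append time
def stepA (vb : List Char) (st : List Char × List String) (ch : Char) : List Char × List String :=
  if pvMem vb ch then (st.1 ++ [ch], st.2)
  else if st.1 ≠ [] then ([], st.2 ++ [String.ofList st.1])
  else st

def get_clean_sequences (dna : String) (valid_bases : String) : List String :=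
  let st := dna.toList.foldl (stepA valid_bases.toList) ([], [])
  if st.1 ≠ [] then st.2 ++ [String.ofList st.1] else st.2

-- ===== PORT B =====
-- inner `while j < n and dna[j] in valid_bases: j += 1`
def runEnd (cs vb : List Char) (j : Nat) : Nat :=
  if h : j < cs.length ∧ pvMem vb (cs.getD j ' ') then runEnd cs vb (j + 1) else j
termination_by cs.length - j
decreasing_by omega

-- the port of B's outer while-loop needs i + 1 ≤ runEnd cs vb (i+1) for termination
theorem le_runEnd (cs vb : List Char) (j : Nat) : j ≤ runEnd cs vb j := by
  induction j using runEnd.induct cs vb with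
  | case1 j h ih => rw [runEnd, dif_pos h]; omega
  | case2 j h => rw [runEnd, dif_neg h]

-- outer while-loop of B; dna[i:j] with 0 ≤ i ≤ j ≤ n is exactly (cs.drop i).take (j - i)
def goB (cs vb : List Char) (i : Nat) : List String :=
  if h : i < cs.length then
    if pvMem vb (cs.getD i ' ') then
      let j := runEnd cs vb (i + 1)
      String.ofList ((cs.drop i).take (j - i)) :: goB cs vb j
    else goB cs vb (i + 1)
  else []
termination_by cs.length - i
decreasing_by
  · have := le_runEnd cs vb (i + 1); omega
  · omega

def get_clean_sequences_alt (dna : String) (valid_bases : String) : List String :=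
  goB dna.toList valid_bases.toList 0

-- ===== PRECONDITION & SPEC =====
def Spec_get_clean_sequences (dna : String) (valid_bases : String) (out : List String) : Prop := out = get_clean_sequences_alt dna valid_bases
instance (dna : String) (valid_bases : String) (out : List String) : Decidable (Spec_get_clean_sequences dna valid_bases out) := by unfold Spec_get_clean_sequences; infer_instance

-- ===== CLAIM (what is proved, stated in full; the proofs are below) =====
def Claim_equal_get_clean_sequences : Prop := ∀ (dna : String) (valid_bases : String), Dom_get_clean_sequences dna valid_bases → Spec_get_clean_sequences dna valid_bases (get_clean_sequences dna valid_bases)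

-- ===== LEMMAS AND PROOFS =====

-- reference splitter: maximal runs of pvMem-valid characters
def runs (vb : List Char) : List Char → List (List Char)
  | [] => []
  | c :: rest =>
    if pvMem vb c then
      (c :: rest.takeWhile (pvMem vb)) :: runs vb (rest.dropWhile (pvMem vb))
    else runs vb rest
termination_by cs => cs.length
decreasing_by
  · have := List.length_dropWhile_le (pvMem vb) rest; simpa using Nat.lt_succ_of_le this
  · simp

-- A's state machine with accumulator `cur`, recursively
def runsA (vb cur : List Char) : List Char → List (List Char)
  | [] => if cur = [] then [] else [cur]
  | c :: rest =>
    if pvMem vb c then runsA vb (cur ++ [c]) rest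
    else if cur = [] then runsA vb [] rest else cur :: runsA vb [] rest

theorem foldl_stepA_eq (vb : List Char) (cs : List Char) :
    ∀ cur seqs,
      (let st := cs.foldl (stepA vb) (cur, seqs)
       if st.1 ≠ [] then st.2 ++ [String.ofList st.1] else st.2)
        = seqs ++ (runsA vb cur cs).map String.ofList := by
  induction cs with
  | nil =>
    intro cur seqs
    simp only [List.foldl_nil, runsA]
    by_cases h : cur = [] <;> simp [h]
  | cons c rest ih =>
    intro cur seqs
    rw [List.foldl_cons]
    by_cases hv : pvMem vb c
    · rw [show stepA vb (cur, seqs) c = (cur ++ [c], seqs) from by simp [stepA, hv]]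
      rw [ih (cur ++ [c]) seqs, runsA, if_pos hv]
    · by_cases hc : cur = []
      · rw [show stepA vb (cur, seqs) c = (cur, seqs) from by simp [stepA, hv, hc]]
        rw [ih cur seqs, runsA, if_neg hv, hc, if_pos rfl]
      · rw [show stepA vb (cur, seqs) c = ([], seqs ++ [String.ofList cur]) from by
          simp [stepA, hv, hc]]
        rw [ih [] (seqs ++ [String.ofList cur]), runsA, if_neg hv, if_neg hc]
        simp

theorem runsA_eq (vb : List Char) (cs : List Char) :
    ∀ cur, runsA vb cur cs =
      if cur = [] then runs vb cs
      else (cur ++ cs.takeWhile (pvMem vb)) :: runs vb (cs.dropWhile (pvMem vb)) := by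
  induction cs with
  | nil =>
    intro cur
    by_cases h : cur = [] <;> simp [runsA, runs, h]
  | cons c rest ih =>
    intro cur
    by_cases hv : pvMem vb c
    · rw [runsA, if_pos hv, ih (cur ++ [c])]
      by_cases hc : cur = [] <;>
        simp [hc, runs, hv]
    · rw [runsA, if_neg hv]
      by_cases hc : cur = []
      · simp [hc, ih, runs, hv]
      · simp [hc, ih, runs, hv]

theorem runEnd_eq (cs vb : List Char) :
    ∀ j, runEnd cs vb j = j + ((cs.drop j).takeWhile (pvMem vb)).length := by
  intro j
  induction j using runEnd.induct cs vb with
  | case1 j h ih =>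
    rw [runEnd, dif_pos h]
    obtain ⟨hj, hp⟩ := h
    rw [List.drop_eq_getElem_cons hj]
    rw [List.getD_eq_getElem cs ' ' hj] at hp
    rw [List.takeWhile_cons, if_pos hp]
    simp only [List.length_cons]
    omega
  | case2 j h =>
    rw [runEnd, dif_neg h]
    by_cases hj : j < cs.length
    · have hp : ¬ pvMem vb (cs.getD j ' ') := fun hp => h ⟨hj, hp⟩
      rw [List.drop_eq_getElem_cons hj]
      rw [List.getD_eq_getElem cs ' ' hj] at hp
      rw [List.takeWhile_cons, if_neg hp]
      simp
    · rw [List.drop_eq_nil_of_le (by omega)]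
      simp

theorem goB_eq (cs vb : List Char) :
    ∀ i, goB cs vb i = (runs vb (cs.drop i)).map String.ofList := by
  intro i
  induction i using goB.induct cs vb with
  | case1 i h hv j ih =>
    have hv' : pvMem vb cs[i] = true := by rwa [List.getD_eq_getElem cs ' ' h] at hv
    have hj2 : j = (i + 1) + ((cs.drop (i + 1)).takeWhile (pvMem vb)).length :=
      runEnd_eq cs vb (i + 1)
    have htw : (cs.drop (i + 1)).take ((cs.drop (i + 1)).takeWhile (pvMem vb)).length
        = (cs.drop (i + 1)).takeWhile (pvMem vb) :=
      (List.prefix_iff_eq_take.mp (List.takeWhile_prefix _)).symm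
    have hdw : (cs.drop (i + 1)).drop ((cs.drop (i + 1)).takeWhile (pvMem vb)).length
        = (cs.drop (i + 1)).dropWhile (pvMem vb) := by
      nth_rewrite 2 [← List.takeWhile_append_dropWhile (p := pvMem vb) (l := cs.drop (i + 1))]
      rw [List.drop_left]
    rw [goB, dif_pos h, if_pos hv]
    show String.ofList ((cs.drop i).take (j - i)) :: goB cs vb j
        = (runs vb (cs.drop i)).map String.ofList
    have htake : (cs.drop i).take (j - i)
        = cs[i] :: (cs.drop (i + 1)).takeWhile (pvMem vb) := by
      rw [List.drop_eq_getElem_cons h, hj2]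
      have hn : (i + 1) + ((cs.drop (i + 1)).takeWhile (pvMem vb)).length - i
          = ((cs.drop (i + 1)).takeWhile (pvMem vb)).length + 1 := by omega
      rw [hn, List.take_succ_cons, htw]
    have hdj : cs.drop j = (cs.drop (i + 1)).dropWhile (pvMem vb) := by
      rw [← hdw, List.drop_drop, hj2, Nat.add_comm]
    rw [ih, htake, hdj]
    conv_rhs => rw [List.drop_eq_getElem_cons h]
    rw [runs, if_pos hv', List.map_cons]
  | case2 i h hv ih =>
    rw [goB, dif_pos h, if_neg hv]
    rw [List.drop_eq_getElem_cons h]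
    rw [List.getD_eq_getElem cs ' ' h] at hv
    rw [runs, if_neg hv, ih]
  | case3 i h =>
    rw [goB, dif_neg h]
    rw [List.drop_eq_nil_of_le (by omega)]
    simp [runs]

-- ===== VERDICT (by name: the statement is the Claim_ definition above) =====
theorem get_clean_sequences_spec : Claim_equal_get_clean_sequences := by
  intro dna valid_bases _
  unfold Spec_get_clean_sequences get_clean_sequences get_clean_sequences_alt
  rw [goB_eq]
  simp only [List.drop_zero]
  have := foldl_stepA_eq valid_bases.toList dna.toList [] []
  simp only [List.nil_append] at this
  rw [this, runsA_eq, if_pos rfl]
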